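-- pv_equiv track=rewrite | github.com/nyimbi/apg | capabilities/common/mfa/enrollment_wizard.py | _optimize_enrollment_order
-- ===== SOURCE A (Python) =====
-- from typing import Optional, Dict, Any, List, Tuple, Union
--
-- def _optimize_enrollment_order(selected_methods: List[str]) -> List[str]:
-- 	"""Optimize enrollment order for best user experience"""
-- 	# Prioritize easier methods first
-- 	priority_order = ["face", "voice", "behavioral"]
--
-- 	optimized_order = []
-- 	for method in priority_order:
-- 		if method in selected_methods:
-- 			optimized_order.append(method)
--
-- 	# Add any remaining methods
-- 	for method in selected_methods:
-- 		if method not in optimized_order: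
-- 			optimized_order.append(method)
--
-- 	return optimized_order
-- ===== SOURCE B (Python) =====
-- def _optimize_enrollment_order(selected_methods):
-- 	"""Optimize enrollment order for best user experience"""
-- 	# Single pass: bucket each first occurrence, then concatenate buckets.
-- 	face, voice, behavioral, rest = [], [], [], []
-- 	seen = set()
-- 	for method in selected_methods:
-- 		if method in seen:
-- 			continue
-- 		seen.add(method)
-- 		if method == "face":
-- 			face.append(method)
-- 		elif method == "voice":
-- 			voice.append(method)
-- 		elif method == "behavioral":
-- 			behavioral.append(method)
-- 		else:
-- 			rest.append(method)
-- 	return face + voice + behavioral + rest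
-- ===== Notes on version B (the rewrite author's own statement) =====
-- stated objective: faster
-- what changed: Replaces A's two passes (a scan of the priority list plus a dedup pass whose membership test rescans the growing output list) with a single pass over selected_methods that buckets each first occurrence (face/voice/behavioral/other) using a seen-set, then concatenates the buckets.
import Mathlib
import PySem

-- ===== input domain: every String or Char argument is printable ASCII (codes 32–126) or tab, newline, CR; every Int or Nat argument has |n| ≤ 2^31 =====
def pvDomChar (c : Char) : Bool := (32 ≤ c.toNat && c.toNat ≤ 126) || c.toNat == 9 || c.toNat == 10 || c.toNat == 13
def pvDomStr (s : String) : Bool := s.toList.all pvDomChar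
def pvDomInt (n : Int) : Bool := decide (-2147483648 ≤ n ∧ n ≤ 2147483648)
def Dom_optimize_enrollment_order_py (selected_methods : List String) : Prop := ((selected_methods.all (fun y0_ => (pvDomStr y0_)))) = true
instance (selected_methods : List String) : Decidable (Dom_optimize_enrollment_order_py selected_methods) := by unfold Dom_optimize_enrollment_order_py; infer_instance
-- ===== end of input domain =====

-- B replaces A's two passes (priority scan + dedup pass that rescans the growing output)
-- with one bucketing pass over selected_methods using a seen-set; return values proved equal.


-- ===== PORT A =====
-- step of A's second loop: append method unless already in the accumulated list
def pvStepA (acc : List String) (method : String) : List String :=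
  if method ∈ acc then acc else acc ++ [method]

def optimize_enrollment_order_py (selected_methods : List String) : List String :=
  let priority_order : List String := ["face", "voice", "behavioral"]
  let optimized_order : List String :=
    priority_order.foldl (fun acc method =>
      if method ∈ selected_methods then acc ++ [method] else acc) []
  selected_methods.foldl pvStepA optimized_order

-- ===== PORT B =====
-- step of B's single pass: skip if seen, else record in seen and append to its bucket
def pvStepB (st : List String × List String × List String × List String × PySem.Set String)
    (method : String) :
    List String × List String × List String × List String × PySem.Set String :=
  let (face, voice, behavioral, rest, seen) := st
  if method ∈ seen then st
  else
    let seen' := PySem.Set.add seen method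
    if method = "face" then (face ++ [method], voice, behavioral, rest, seen')
    else if method = "voice" then (face, voice ++ [method], behavioral, rest, seen')
    else if method = "behavioral" then (face, voice, behavioral ++ [method], rest, seen')
    else (face, voice, behavioral, rest ++ [method], seen')

def optimize_enrollment_order_py_alt (selected_methods : List String) : List String :=
  let st := selected_methods.foldl pvStepB
    (([] : List String), ([] : List String), ([] : List String), ([] : List String),
      (PySem.Set.empty : PySem.Set String))
  st.1 ++ st.2.1 ++ st.2.2.1 ++ st.2.2.2.1

-- ===== PRECONDITION & SPEC =====
def Spec_optimize_enrollment_order_py (selected_methods : List String) (out : List String) : Prop := out = optimize_enrollment_order_py_alt selected_methods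
instance (selected_methods : List String) (out : List String) : Decidable (Spec_optimize_enrollment_order_py selected_methods out) := by unfold Spec_optimize_enrollment_order_py; infer_instance

-- ===== CLAIM (what is proved, stated in full; the proofs are below) =====
def Claim_equal_optimize_enrollment_order_py : Prop := ∀ (selected_methods : List String), Dom_optimize_enrollment_order_py selected_methods → Spec_optimize_enrollment_order_py selected_methods (optimize_enrollment_order_py selected_methods)

-- ===== LEMMAS AND PROOFS =====

def pvPrio : List String := ["face", "voice", "behavioral"]

-- what A's dedup loop appends, starting from a given "already present" list
def pvDed (seen : List String) : List String → List String
  | [] => []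
  | x :: xs => if x ∈ seen then pvDed seen xs else x :: pvDed (x :: seen) xs

-- what B's pass appends to one priority bucket
def pvE (m : String) (s : PySem.Set String) (xs : List String) : List String :=
  if m ∈ xs ∧ m ∉ s then [m] else []

-- what B's pass appends to the rest bucket
def pvG (s : PySem.Set String) : List String → List String
  | [] => []
  | x :: xs =>
    if x ∈ s then pvG s xs
    else if x ∈ pvPrio then pvG (PySem.Set.add s x) xs
    else x :: pvG (PySem.Set.add s x) xs

theorem pvDed_congr (xs : List String) (s t : List String)
    (h : ∀ a, a ∈ s ↔ a ∈ t) : pvDed s xs = pvDed t xs := by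
  induction xs generalizing s t with
  | nil => rfl
  | cons x xs ih =>
    simp only [pvDed]
    by_cases hx : x ∈ s
    · rw [if_pos hx, if_pos ((h x).mp hx)]; exact ih s t h
    · rw [if_neg hx, if_neg (fun hc => hx ((h x).mpr hc))]
      refine congrArg _ (ih _ _ ?_)
      intro a; simp [List.mem_cons, h a]

theorem pvFoldA (xs : List String) (acc : List String) :
    xs.foldl pvStepA acc = acc ++ pvDed acc xs := by
  induction xs generalizing acc with
  | nil => simp [pvDed]
  | cons x xs ih =>
    simp only [List.foldl_cons, pvStepA, pvDed]
    by_cases hx : x ∈ acc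
    · simp only [if_pos hx]; exact ih acc
    · simp only [if_neg hx]
      rw [ih (acc ++ [x]), List.append_assoc]
      refine congrArg _ (congrArg _ (pvDed_congr xs _ _ ?_))
      intro a; simp [List.mem_append, List.mem_cons, or_comm]

theorem pvE_skip (m x : String) (s : PySem.Set String) (xs : List String) (hx : x ∈ s) :
    pvE m s (x :: xs) = pvE m s xs := by
  by_cases hmx : m = x
  · subst hmx; simp [pvE, hx]
  · simp [pvE, List.mem_cons, hmx]

theorem pvE_shift (m x : String) (s : PySem.Set String) (xs : List String) (hmx : m ≠ x) :
    pvE m s (x :: xs) = pvE m (PySem.Set.add s x) xs := by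
  simp [pvE, List.mem_cons, hmx, PySem.Set.mem_add]

theorem pvE_hit (x : String) (s : PySem.Set String) (xs : List String) (hx : x ∉ s) :
    pvE x s (x :: xs) = [x] ∧ pvE x (PySem.Set.add s x) xs = [] := by
  constructor
  · simp [pvE, hx]
  · simp [pvE, PySem.Set.mem_add]

theorem pvFoldB (xs : List String) (f v b r : List String) (s : PySem.Set String) :
    xs.foldl pvStepB (f, v, b, r, s) =
      (f ++ pvE "face" s xs, v ++ pvE "voice" s xs, b ++ pvE "behavioral" s xs,
        r ++ pvG s xs, PySem.Set.update s xs) := by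
  induction xs generalizing f v b r s with
  | nil => simp [pvE, pvG, PySem.Set.update]
  | cons x xs ih =>
    simp only [List.foldl_cons, pvStepB]
    by_cases hx : x ∈ s
    · rw [if_pos hx, ih, pvE_skip _ _ _ _ hx, pvE_skip _ _ _ _ hx, pvE_skip _ _ _ _ hx]
      have hadd : PySem.Set.add s x = s := by
        simp [PySem.Set.add, PySem.Set.contains, hx]
      simp only [pvG, if_pos hx, PySem.Set.update, List.foldl_cons, hadd]
    · rw [if_neg hx]
      by_cases h1 : x = "face"
      · subst h1
        rw [if_pos rfl, ih]
        rw [(pvE_hit _ s xs hx).1, (pvE_hit _ s xs hx).2,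
          pvE_shift "voice" "face" s xs (by decide), pvE_shift "behavioral" "face" s xs (by decide)]
        have hg : pvG s ("face" :: xs) = pvG (PySem.Set.add s "face") xs := by
          simp [pvG, hx, pvPrio]
        simp [hg, PySem.Set.update]
      · rw [if_neg h1]
        by_cases h2 : x = "voice"
        · subst h2
          rw [if_pos rfl, ih]
          rw [(pvE_hit _ s xs hx).1, (pvE_hit _ s xs hx).2,
            pvE_shift "face" "voice" s xs (by decide), pvE_shift "behavioral" "voice" s xs (by decide)]
          have hg : pvG s ("voice" :: xs) = pvG (PySem.Set.add s "voice") xs := by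
            simp [pvG, hx, pvPrio]
          simp [hg, PySem.Set.update]
        · rw [if_neg h2]
          by_cases h3 : x = "behavioral"
          · subst h3
            rw [if_pos rfl, ih]
            rw [(pvE_hit _ s xs hx).1, (pvE_hit _ s xs hx).2,
              pvE_shift "face" "behavioral" s xs (by decide), pvE_shift "voice" "behavioral" s xs (by decide)]
            have hg : pvG s ("behavioral" :: xs) = pvG (PySem.Set.add s "behavioral") xs := by
              simp [pvG, hx, pvPrio]
            simp [hg, PySem.Set.update]
          · rw [if_neg h3, ih]
            rw [pvE_shift "face" x s xs (fun h => h1 h.symm),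
              pvE_shift "voice" x s xs (fun h => h2 h.symm),
              pvE_shift "behavioral" x s xs (fun h => h3 h.symm)]
            have hg : pvG s (x :: xs) = x :: pvG (PySem.Set.add s x) xs := by
              have hp : x ∉ pvPrio := by simp [pvPrio, h1, h2, h3]
              simp [pvG, hx, hp]
            simp [hg, PySem.Set.update]

-- A's dedup pass, seeded with the priority prefix, appends exactly B's rest bucket
theorem pvBridge (xs : List String) (seen : List String) (s : PySem.Set String)
    (h1 : ∀ a, a ∉ pvPrio → (a ∈ seen ↔ a ∈ s))
    (h2 : ∀ a, a ∈ pvPrio → a ∈ xs → a ∈ seen) :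
    pvDed seen xs = pvG s xs := by
  induction xs generalizing seen s with
  | nil => rfl
  | cons x xs ih =>
    simp only [pvDed, pvG]
    by_cases hp : x ∈ pvPrio
    · have hseen : x ∈ seen := h2 x hp (List.mem_cons_self)
      rw [if_pos hseen]
      by_cases hs : x ∈ s
      · rw [if_pos hs]
        exact ih seen s h1 (fun a ha hx => h2 a ha (List.mem_cons_of_mem _ hx))
      · rw [if_neg hs, if_pos hp]
        refine ih seen _ ?_ (fun a ha hx => h2 a ha (List.mem_cons_of_mem _ hx))
        intro a ha
        rw [h1 a ha, PySem.Set.mem_add]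
        constructor
        · exact Or.inl
        · rintro (h | rfl)
          · exact h
          · exact absurd hp ha
    · have hiff : x ∈ seen ↔ x ∈ s := h1 x hp
      by_cases hseen : x ∈ seen
      · rw [if_pos hseen, if_pos (hiff.mp hseen)]
        exact ih seen s h1 (fun a ha hx => h2 a ha (List.mem_cons_of_mem _ hx))
      · rw [if_neg hseen, if_neg (fun hc => hseen (hiff.mpr hc)), if_neg hp]
        refine congrArg _ (ih _ _ ?_ ?_)
        · intro a ha
          simp [List.mem_cons, PySem.Set.mem_add, h1 a ha, or_comm]
        · intro a ha hx
          exact List.mem_cons_of_mem _ (h2 a ha (List.mem_cons_of_mem _ hx))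

-- ===== VERDICT (by name: the statement is the Claim_ definition above) =====
theorem optimize_enrollment_order_py_spec : Claim_equal_optimize_enrollment_order_py := by
  intro sel _
  show optimize_enrollment_order_py sel = optimize_enrollment_order_py_alt sel
  have hPfx : (["face", "voice", "behavioral"] : List String).foldl
      (fun acc method => if method ∈ sel then acc ++ [method] else acc) [] =
      pvE "face" PySem.Set.empty sel ++ pvE "voice" PySem.Set.empty sel ++
        pvE "behavioral" PySem.Set.empty sel := by
    by_cases h1 : "face" ∈ sel <;> by_cases h2 : "voice" ∈ sel <;>
      by_cases h3 : "behavioral" ∈ sel <;>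
      simp [List.foldl, pvE, h1, h2, h3, PySem.Set.empty]
  have hA : optimize_enrollment_order_py sel =
      (pvE "face" PySem.Set.empty sel ++ pvE "voice" PySem.Set.empty sel ++
        pvE "behavioral" PySem.Set.empty sel) ++
      pvDed (pvE "face" PySem.Set.empty sel ++ pvE "voice" PySem.Set.empty sel ++
        pvE "behavioral" PySem.Set.empty sel) sel := by
    simp only [optimize_enrollment_order_py, hPfx, pvFoldA]
  have hB : optimize_enrollment_order_py_alt sel =
      pvE "face" PySem.Set.empty sel ++ pvE "voice" PySem.Set.empty sel ++
        pvE "behavioral" PySem.Set.empty sel ++ pvG PySem.Set.empty sel := by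
    simp only [optimize_enrollment_order_py_alt, pvFoldB]
    simp [List.append_assoc]
  have hmemE : ∀ (a m : String), a ∈ pvE m PySem.Set.empty sel → a = m := by
    intro a m hm
    simp only [pvE, PySem.Set.empty, List.not_mem_nil, not_false_iff, and_true] at hm
    split at hm
    · simpa using hm
    · simp at hm
  have hh1 : ∀ a, a ∉ pvPrio →
      (a ∈ pvE "face" PySem.Set.empty sel ++ pvE "voice" PySem.Set.empty sel ++
        pvE "behavioral" PySem.Set.empty sel ↔ a ∈ (PySem.Set.empty : PySem.Set String)) := by
    intro a ha
    constructor
    · intro hmem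
      exfalso
      rcases List.mem_append.mp hmem with hmem | hmem
      · rcases List.mem_append.mp hmem with hmem | hmem
        · exact ha (by simp [pvPrio, hmemE a _ hmem])
        · exact ha (by simp [pvPrio, hmemE a _ hmem])
      · exact ha (by simp [pvPrio, hmemE a _ hmem])
    · intro hmem
      exact absurd hmem (by simp [PySem.Set.empty])
  have hh2 : ∀ a, a ∈ pvPrio → a ∈ sel →
      a ∈ pvE "face" PySem.Set.empty sel ++ pvE "voice" PySem.Set.empty sel ++
        pvE "behavioral" PySem.Set.empty sel := by
    intro a ha hsel
    have : a = "face" ∨ a = "voice" ∨ a = "behavioral" := by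
      simpa [pvPrio] using ha
    rcases this with rfl | rfl | rfl <;>
      simp [pvE, hsel, PySem.Set.empty, List.mem_append]
  rw [hA, hB, pvBridge sel _ PySem.Set.empty hh1 hh2]
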